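-- pv_equiv track=rewrite | github.com/Jachdich/retargetable-assembler | as.py | whatis
-- ===== SOURCE A (Python) =====
-- regsets = {
--     "gpr": {"a": "00", "b": "01"},
--     "addr": {"a": "00"}}
--
-- def whatis(thing):
--     p = []
--     for regtype in regsets:
--         if thing in regsets[regtype]:
--             p.append(regtype)
--
--     if thing.isdigit():
--         p.append("*")
--
--     if thing.startswith("[") and thing.endswith("]"):
--         p.extend(["[" + a + "]" for a in whatis(thing[1:-1])])
--
--     return p
-- ===== SOURCE B (Python) =====
-- regsets = {
--     "gpr": {"a": "00", "b": "01"},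
--     "addr": {"a": "00"}}
--
-- def whatis(thing):
--     s, depth = thing, 0
--     while s.startswith("[") and s.endswith("]"):
--         depth += 1
--         s = s[1:-1]
--     p = [regtype for regtype in regsets if s in regsets[regtype]]
--     if s.isdigit():
--         p.append("*")
--     return ["[" * depth + x + "]" * depth for x in p]
-- ===== Notes on version B (the rewrite author's own statement) =====
-- stated objective: simpler
-- what changed: Replaces A's recursive wrap-at-every-layer scheme with a single iterative bracket-stripping loop (counting depth), one base classification of the stripped core, and one final wrap with depth copies of brackets.
import Mathlib
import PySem

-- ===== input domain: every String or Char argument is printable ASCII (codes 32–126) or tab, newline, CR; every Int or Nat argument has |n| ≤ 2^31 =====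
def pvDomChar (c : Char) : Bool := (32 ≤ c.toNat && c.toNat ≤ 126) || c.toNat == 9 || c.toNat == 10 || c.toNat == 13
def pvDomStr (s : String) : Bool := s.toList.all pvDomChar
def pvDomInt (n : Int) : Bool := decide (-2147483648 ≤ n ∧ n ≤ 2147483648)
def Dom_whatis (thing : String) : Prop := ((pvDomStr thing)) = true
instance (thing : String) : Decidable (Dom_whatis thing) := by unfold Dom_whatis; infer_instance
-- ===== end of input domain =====

-- B replaces A's recursion (wrap the result at every bracket layer) by one iterative
-- bracket-stripping loop with a depth counter, one base classification, one final wrap: simpler decomposition, same results.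

-- shared module constant: regsets with, for each regtype, the list of its keys (in dict order)
def pvRegsets : List (List Char × List (List Char)) :=
  [(['g','p','r'], [['a'], ['b']]), (['a','d','d','r'], [['a']])]

-- stripping one bracket layer shortens the token (used by both ports' termination)
lemma pvSliceLt (cs : List Char) (h : cs ≠ []) :
    (PySem.List.slice cs (some (1:Int)) (some (-1))).length < cs.length := by
  have hl := PySem.List.length_slice cs 1 (-1)
  have hp : 0 < cs.length := List.length_pos_iff.mpr h
  simp [PySem.List.clampIdx, h] at hl
  omega

-- ===== PORT A =====
-- A's recursion, on the char list (thing[1:-1] = slice 1:-1)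
def whatisGo (cs : List Char) : List String :=
  let p := pvRegsets.foldl (fun p rs => if cs ∈ rs.2 then p ++ [String.ofList rs.1] else p) []
  let p := if PySem.Chars.strIsdigit cs then p ++ ["*"] else p
  if h : PySem.Chars.startswith cs ['['] && PySem.Chars.endswith cs [']'] then
    p ++ ((whatisGo (PySem.List.slice cs (some (1:Int)) (some (-1)))).map (fun a => "[" ++ a ++ "]"))
  else p
termination_by cs.length
decreasing_by
  exact pvSliceLt cs (by rintro rfl; exact absurd h (by decide))

def whatis (thing : String) : List String := whatisGo thing.toList

-- ===== PORT B =====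
-- the while loop: strip one bracket layer per iteration, counting depth
def stripGo (cs : List Char) (depth : Nat) : Nat × List Char :=
  if h : PySem.Chars.startswith cs ['['] && PySem.Chars.endswith cs [']'] then
    stripGo (PySem.List.slice cs (some (1:Int)) (some (-1))) (depth + 1)
  else (depth, cs)
termination_by cs.length
decreasing_by
  exact pvSliceLt cs (by rintro rfl; exact absurd h (by decide))

def whatis_alt (thing : String) : List String :=
  let (depth, s) := stripGo thing.toList 0
  let p := (pvRegsets.filter (fun rs => s ∈ rs.2)).map (fun rs => String.ofList rs.1)
  let p := if PySem.Chars.strIsdigit s then p ++ ["*"] else p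
  p.map (fun x => String.ofList (List.replicate depth '[') ++ x ++ String.ofList (List.replicate depth ']'))

-- ===== PRECONDITION & SPEC =====
def Spec_whatis (thing : String) (out : List String) : Prop := out = whatis_alt thing
instance (thing : String) (out : List String) : Decidable (Spec_whatis thing out) := by unfold Spec_whatis; infer_instance

-- ===== CLAIM (what is proved, stated in full; the proofs are below) =====
def Claim_equal_whatis : Prop := ∀ (thing : String), Dom_whatis thing → Spec_whatis thing (whatis thing)

-- ===== LEMMAS AND PROOFS =====

-- the base classification both ports compute for a (stripped) token
def pvBase (s : List Char) : List String :=
  let p := (pvRegsets.filter (fun rs => s ∈ rs.2)).map (fun rs => String.ofList rs.1)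
  if PySem.Chars.strIsdigit s then p ++ ["*"] else p

def pvWrap (d : Nat) (x : String) : String :=
  String.ofList (List.replicate d '[') ++ x ++ String.ofList (List.replicate d ']')

lemma pvWrap_zero (x : String) : pvWrap 0 x = x := by
  apply String.ext; simp [pvWrap]

lemma map_pvWrap_zero (l : List String) : l.map (pvWrap 0) = l := by
  rw [show (pvWrap 0) = (fun x => x) from funext pvWrap_zero, List.map_id']

lemma pvWrap_succ (d : Nat) (x : String) : "[" ++ pvWrap d x ++ "]" = pvWrap (d + 1) x := by
  apply String.ext
  simp [pvWrap, List.replicate_succ]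
  rw [← List.replicate_succ', List.replicate_succ]

lemma pvCond_ne_nil {cs : List Char}
    (h : (PySem.Chars.startswith cs ['['] && PySem.Chars.endswith cs [']']) = true) :
    cs ≠ [] := by
  rintro rfl; exact absurd h (by decide)

lemma stripGo_shift : ∀ (n : Nat) (cs : List Char), cs.length ≤ n → ∀ d,
    stripGo cs d = (d + (stripGo cs 0).1, (stripGo cs 0).2) := by
  intro n
  induction n with
  | zero =>
      intro cs hc d
      have : cs = [] := by
        cases cs with
        | nil => rfl
        | cons a t => simp at hc
      subst this
      rw [stripGo, dif_neg (by decide), stripGo, dif_neg (by decide)]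
      simp
  | succ n ih =>
      intro cs hc d
      by_cases h : (PySem.Chars.startswith cs ['['] && PySem.Chars.endswith cs [']']) = true
      · rw [stripGo, dif_pos h]
        conv_rhs => rw [stripGo, dif_pos h]
        have hlt := pvSliceLt cs (pvCond_ne_nil h)
        rw [ih _ (by omega) (d + 1), ih _ (by omega) 1]
        simp [Nat.add_assoc]
      · rw [stripGo, dif_neg h]
        conv_rhs => rw [stripGo, dif_neg h]
        simp

-- a bracketed token is neither a register name nor a digit string
lemma pvBase_bracket (t : List Char) : pvBase ('[' :: t) = [] := by
  simp [pvBase, pvRegsets, PySem.Chars.strIsdigit,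
        show PySem.Chars.isdigit '[' = false from by decide]

lemma base_foldl_eq (cs : List Char) :
    pvRegsets.foldl (fun p rs => if cs ∈ rs.2 then p ++ [String.ofList rs.1] else p) []
      = (pvRegsets.filter (fun rs => cs ∈ rs.2)).map (fun rs => String.ofList rs.1) := by
  simp [pvRegsets, List.filter]
  split_ifs <;> simp_all

lemma pvBase_def (s : List Char) :
    (if PySem.Chars.strIsdigit s then
        ((pvRegsets.filter (fun rs => s ∈ rs.2)).map (fun rs => String.ofList rs.1)) ++ ["*"]
      else (pvRegsets.filter (fun rs => s ∈ rs.2)).map (fun rs => String.ofList rs.1))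
      = pvBase s := rfl

lemma whatisGo_eq : ∀ (n : Nat) (cs : List Char), cs.length ≤ n →
    whatisGo cs = (pvBase (stripGo cs 0).2).map (pvWrap (stripGo cs 0).1) := by
  intro n
  induction n with
  | zero =>
      intro cs hc
      have : cs = [] := by
        cases cs with
        | nil => rfl
        | cons a t => simp at hc
      subst this
      rw [whatisGo, dif_neg (by decide), stripGo, dif_neg (by decide), base_foldl_eq, pvBase_def]
      exact (map_pvWrap_zero _).symm
  | succ n ih =>
      intro cs hc
      by_cases h : (PySem.Chars.startswith cs ['['] && PySem.Chars.endswith cs [']']) = true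
      · obtain ⟨t, rfl⟩ : ∃ t, cs = '[' :: t := by
          have h1 : PySem.Chars.startswith cs ['['] = true := by
            rcases Bool.and_eq_true_iff.mp h with ⟨h1, -⟩
            exact h1
          obtain ⟨u, hu⟩ := (PySem.Chars.startswith_iff _ _).mp h1
          exact ⟨u, by rw [← hu]; rfl⟩
        have hlt := pvSliceLt ('[' :: t) (pvCond_ne_nil h)
        rw [whatisGo, dif_pos h, base_foldl_eq, pvBase_def, pvBase_bracket t, List.nil_append]
        rw [stripGo, dif_pos h, stripGo_shift _ _ (le_refl _) 1]
        rw [ih _ (by simp only [List.length_cons] at hc hlt ⊢; omega)]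
        dsimp only
        rw [List.map_map]
        apply List.map_congr_left
        intro x _
        simp only [Function.comp_apply]
        rw [pvWrap_succ, Nat.add_comm]
      · rw [whatisGo, dif_neg h, stripGo, dif_neg h, base_foldl_eq, pvBase_def]
        exact (map_pvWrap_zero _).symm

-- ===== VERDICT (by name: the statement is the Claim_ definition above) =====
theorem whatis_spec : Claim_equal_whatis := by
  intro thing _
  unfold Spec_whatis whatis whatis_alt
  rw [whatisGo_eq thing.toList.length _ (le_refl _)]
  rcases hs : stripGo thing.toList 0 with ⟨d, s⟩
  rfl
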